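-- pv_equiv track=rewrite | github.com/Jonathangadeaharder/IdeaProjects | Backend/core/contract_middleware.py | _path_matches_pattern
-- ===== SOURCE A (Python) =====
-- def _path_matches_pattern(actual_path: str, schema_path: str) -> bool:
--     """Check if actual path matches OpenAPI path pattern with parameters"""
--     actual_parts = actual_path.strip("/").split("/")
--     schema_parts = schema_path.strip("/").split("/")
--
--     if len(actual_parts) != len(schema_parts):
--         return False
--
--     for actual_part, schema_part in zip(actual_parts, schema_parts):
--         # Check if schema part is a parameter (enclosed in {})
--         if schema_part.startswith("{") and schema_part.endswith("}"):
--             continue  # Parameter matches any value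
--         elif actual_part != schema_part:
--             return False
--
--     return True
-- ===== SOURCE B (Python) =====
-- def _path_matches_pattern(actual_path: str, schema_path: str) -> bool:
--     """Check if actual path matches OpenAPI path pattern with parameters."""
--     def match(a_parts, s_parts):
--         if not a_parts and not s_parts:
--             return True
--         if not a_parts or not s_parts:
--             return False
--         s0 = s_parts[0]
--         if (s0.startswith("{") and s0.endswith("}")) or a_parts[0] == s0:
--             return match(a_parts[1:], s_parts[1:])
--         return False
--     return match(actual_path.strip("/").split("/"),
--                  schema_path.strip("/").split("/"))
-- ===== Notes on version B (the rewrite author's own statement) =====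
-- stated objective: alternative
-- what changed: Replaces A's up-front length comparison plus zip for-loop with a single recursion that consumes both segment lists in lockstep, detecting length mismatch at the base cases.
import Mathlib
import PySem

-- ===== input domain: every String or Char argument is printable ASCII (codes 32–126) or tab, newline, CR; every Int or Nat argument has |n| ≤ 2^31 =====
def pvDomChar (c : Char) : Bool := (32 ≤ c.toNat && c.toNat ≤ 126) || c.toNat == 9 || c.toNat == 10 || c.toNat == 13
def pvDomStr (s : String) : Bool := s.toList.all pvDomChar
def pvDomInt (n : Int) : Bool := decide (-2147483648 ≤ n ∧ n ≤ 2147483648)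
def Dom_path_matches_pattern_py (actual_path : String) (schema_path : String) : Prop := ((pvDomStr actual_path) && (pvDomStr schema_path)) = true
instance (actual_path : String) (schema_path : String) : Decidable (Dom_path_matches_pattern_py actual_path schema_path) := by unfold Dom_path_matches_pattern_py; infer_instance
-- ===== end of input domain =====

-- B replaces A's length check + zip loop with a single lockstep recursion over both segment lists (alternative decomposition, same cost).


-- ===== PORT A =====
-- A: length check, then for-loop over zip with early return
def pmpALoop : List (String × String) → Bool
  | [] => true
  | (a, s) :: rest =>
    if PySem.Str.startswith s "{" && PySem.Str.endswith s "}" then pmpALoop rest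
    else if a ≠ s then false
    else pmpALoop rest

def path_matches_pattern_py (actual_path : String) (schema_path : String) : Bool :=
  let actual_parts := (PySem.Str.split? (PySem.Str.stripChars actual_path "/") "/").getD []
  let schema_parts := (PySem.Str.split? (PySem.Str.stripChars schema_path "/") "/").getD []
  if actual_parts.length ≠ schema_parts.length then false
  else pmpALoop (actual_parts.zip schema_parts)

-- ===== PORT B =====
-- B: one recursion consuming both segment lists in lockstep (no length pre-check)
def pmpBMatch : List String → List String → Bool
  | [], [] => true
  | [], _ :: _ => false
  | _ :: _, [] => false
  | a :: as, s :: ss =>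
    if (PySem.Str.startswith s "{" && PySem.Str.endswith s "}") || a == s then pmpBMatch as ss
    else false

def path_matches_pattern_py_alt (actual_path : String) (schema_path : String) : Bool :=
  pmpBMatch ((PySem.Str.split? (PySem.Str.stripChars actual_path "/") "/").getD [])
            ((PySem.Str.split? (PySem.Str.stripChars schema_path "/") "/").getD [])

-- ===== PRECONDITION & SPEC =====
def Spec_path_matches_pattern_py (actual_path : String) (schema_path : String) (out : Bool) : Prop := out = path_matches_pattern_py_alt actual_path schema_path
instance (actual_path : String) (schema_path : String) (out : Bool) : Decidable (Spec_path_matches_pattern_py actual_path schema_path out) := by unfold Spec_path_matches_pattern_py; infer_instance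

-- ===== CLAIM (what is proved, stated in full; the proofs are below) =====
def Claim_equal_path_matches_pattern_py : Prop := ∀ (actual_path : String) (schema_path : String), Dom_path_matches_pattern_py actual_path schema_path → Spec_path_matches_pattern_py actual_path schema_path (path_matches_pattern_py actual_path schema_path)

-- ===== LEMMAS AND PROOFS =====
theorem pmp_loop_eq (as ss : List String) :
    (if as.length ≠ ss.length then false else pmpALoop (as.zip ss)) = pmpBMatch as ss := by
  induction as generalizing ss with
  | nil => cases ss <;> simp [pmpALoop, pmpBMatch]
  | cons a as ih =>
    cases ss with
    | nil => simp [pmpBMatch]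
    | cons s ss =>
      cases hb : (PySem.Str.startswith s "{" && PySem.Str.endswith s "}") with
      | true =>
        simp only [List.length_cons, ne_eq, Nat.add_right_cancel_iff, List.zip_cons_cons,
          pmpALoop, pmpBMatch, hb, if_true]
        simpa using ih ss
      | false =>
        by_cases he : a = s
        · simp only [List.length_cons, ne_eq, Nat.add_right_cancel_iff, List.zip_cons_cons,
            pmpALoop, pmpBMatch, hb, he, Bool.false_or, beq_self_eq_true,
            Bool.false_or]
          simpa using ih ss
        · simp only [List.length_cons, ne_eq, Nat.add_right_cancel_iff, List.zip_cons_cons,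
            pmpALoop, pmpBMatch, hb, he]
          simp [he]

-- ===== VERDICT (by name: the statement is the Claim_ definition above) =====
theorem path_matches_pattern_py_spec : Claim_equal_path_matches_pattern_py := by
  intro a s _
  unfold Spec_path_matches_pattern_py path_matches_pattern_py path_matches_pattern_py_alt
  exact pmp_loop_eq _ _
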